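-- pv_equiv track=rewrite | github.com/wnstj-yang/Algorithm | 프로그래머스/0/120869. 외계어 사전/외계어 사전.py | solution
-- ===== SOURCE A (Python) =====
-- def solution(spell, dic):
--     spell_dict = {}
--     for s in spell:
--         spell_dict[s] = 1
--     for word in dic:
--         check_spell = dict(spell_dict)
--         for s in word:
--             if s in check_spell and check_spell[s] > 0:
--                 check_spell[s] -= 1
--         if sum(check_spell.values()) == 0:
--             return 1
--     return 2
-- ===== SOURCE B (Python) =====
-- def solution(spell, dic):
--     candidates = dic
--     for c in spell:
--         candidates = [w for w in candidates if c in list(w)]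
--     return 1 if candidates else 2
-- ===== Notes on version B (the rewrite author's own statement) =====
-- stated objective: faster
-- what changed: Inverts the loop nesting: instead of scanning each dictionary word while maintaining a per-word copy of a spell counter dict, B loops over the spell entries and progressively filters the list of candidate words, answering 1 iff any candidate survives all filters; this avoids the per-word dict copy/decrement/sum work and shrinks the candidate list after each filter stage.
import Mathlib
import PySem

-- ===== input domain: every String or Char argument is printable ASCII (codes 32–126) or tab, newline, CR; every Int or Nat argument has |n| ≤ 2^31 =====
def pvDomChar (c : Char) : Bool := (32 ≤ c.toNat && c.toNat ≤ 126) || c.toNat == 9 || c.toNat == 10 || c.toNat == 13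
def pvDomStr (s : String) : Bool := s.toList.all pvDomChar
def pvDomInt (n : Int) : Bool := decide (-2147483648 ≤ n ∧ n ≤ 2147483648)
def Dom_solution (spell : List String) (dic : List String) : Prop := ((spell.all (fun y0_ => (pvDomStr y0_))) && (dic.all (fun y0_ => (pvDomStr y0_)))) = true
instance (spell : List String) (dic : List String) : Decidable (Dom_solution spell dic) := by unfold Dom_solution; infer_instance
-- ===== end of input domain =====

-- B inverts the loop nesting: it loops over the spell entries and progressively filters
-- the candidate word list, instead of scanning each word against a per-word counter dict.

-- ===== PORT A =====
-- for s in word: iterating a Python string yields its 1-char strings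
def pyChars (w : String) : List String := w.toList.map Char.toString

-- inner loop over the word's characters, decrementing check_spell
def checkWord (d : PySem.Dict String Int) (w : String) : PySem.Dict String Int :=
  (pyChars w).foldl
    (fun c s => if c.contains s && decide (0 < c.getD s 0) then c.insert s (c.getD s 0 - 1) else c) d

-- for word in dic: … return 1 … / return 2
def solutionLoop (spell_dict : PySem.Dict String Int) (dic : List String) : Int :=
  match dic with
  | [] => 2
  | word :: rest =>
      let check_spell := checkWord spell_dict word
      if check_spell.values.sum = 0 then 1 else solutionLoop spell_dict rest

def solution (spell : List String) (dic : List String) : Int :=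
  let spell_dict := spell.foldl (fun d s => d.insert s (1 : Int)) PySem.Dict.empty
  solutionLoop spell_dict dic

-- ===== PORT B =====
-- candidates = [w for w in candidates if c in list(w)]   (c in list(w): exact match against the word's 1-char strings)
def solution_alt (spell : List String) (dic : List String) : Int :=
  let candidates := spell.foldl (fun cs c => cs.filter (fun w => decide (c ∈ pyChars w))) dic
  if candidates = [] then 2 else 1

-- ===== PRECONDITION & SPEC =====
def Spec_solution (spell : List String) (dic : List String) (out : Int) : Prop := out = solution_alt spell dic
instance (spell : List String) (dic : List String) (out : Int) : Decidable (Spec_solution spell dic out) := by unfold Spec_solution; infer_instance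

-- ===== CLAIM (what is proved, stated in full; the proofs are below) =====
def Claim_equal_solution : Prop := ∀ (spell : List String) (dic : List String), Dom_solution spell dic → Spec_solution spell dic (solution spell dic)

-- ===== LEMMAS AND PROOFS =====

-- the per-word coverage test both programs decide, as a Bool over the input
def covers (spell : List String) (w : String) : Bool := spell.all (fun c => decide (c ∈ pyChars w))

-- the initial dict: every key inserted with value 1
theorem getD_init (l : List String) (d : PySem.Dict String Int) (k : String) :
    (l.foldl (fun d s => d.insert s (1 : Int)) d).getD k 0 = if k ∈ l then 1 else d.getD k 0 := by
  induction l generalizing d with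
  | nil => simp
  | cons a t ih =>
      simp only [List.foldl_cons, ih, PySem.Dict.getD_insert, List.mem_cons]
      by_cases hka : k = a <;> by_cases hkt : k ∈ t <;> simp [hkt]

-- the inner decrement loop on a 0/1-valued dict: a key's value drops to 0 iff it was 1 and occurs in l
theorem getD_checkLoop (l : List String) (d : PySem.Dict String Int)
    (hv : ∀ j, d.getD j 0 = 0 ∨ d.getD j 0 = 1) (k : String) :
    (l.foldl (fun c s => if c.contains s && decide (0 < c.getD s 0) then c.insert s (c.getD s 0 - 1) else c) d).getD k 0
      = if d.getD k 0 = 1 ∧ k ∈ l then 0 else d.getD k 0 := by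
  induction l generalizing d with
  | nil => simp
  | cons a t ih =>
      simp only [List.foldl_cons]
      by_cases hc : d.contains a = true ∧ 0 < d.getD a 0
      · have hda : d.getD a 0 = 1 := by rcases hv a with h | h <;> omega
        have hstep : (if d.contains a && decide (0 < d.getD a 0) then d.insert a (d.getD a 0 - 1) else d)
            = d.insert a (0 : Int) := by
          simp [hc.1, hda]
        rw [hstep, ih]
        · by_cases hka : k = a
          · subst hka
            simp [PySem.Dict.getD_insert_self, hda]
          · simp only [PySem.Dict.getD_insert, hka, if_false, List.mem_cons]
            by_cases hkt : k ∈ t <;> simp [hkt]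
        · intro j
          by_cases hja : j = a
          · subst hja; simp [PySem.Dict.getD_insert_self]
          · simp only [PySem.Dict.getD_insert, hja, if_false]; exact hv j
      · have hstep : (if d.contains a && decide (0 < d.getD a 0) then d.insert a (d.getD a 0 - 1) else d) = d := by
          rcases (not_and_or.mp hc) with h | h
          · simp [Bool.not_eq_true] at h; simp [h]
          · have : ¬ (0 < d.getD a 0) := h
            simp [this]
        rw [hstep, ih _ hv]
        have hka0 : d.getD k 0 = 1 → k ≠ a := by
          intro h1 hka; subst hka
          rcases Bool.eq_false_or_eq_true (d.contains k) with hct | hcf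
          · exact hc ⟨hct, by omega⟩
          · rw [PySem.Dict.getD_of_not_contains d 0 hcf] at h1; omega
        by_cases hk1 : d.getD k 0 = 1
        · have := hka0 hk1
          simp [hk1, this, List.mem_cons]
        · simp [hk1]

-- a sum of 0/1 integers is 0 iff every summand is 0
theorem sum_zero_iff (l : List Int) (h : ∀ x ∈ l, x = 0 ∨ x = 1) :
    l.sum = 0 ↔ ∀ x ∈ l, x = 0 := by
  induction l with
  | nil => simp
  | cons a t ih =>
      have ha := h a (by simp)
      have hs : 0 ≤ t.sum := by
        have : ∀ x ∈ t, (0:Int) ≤ x := fun x hx => by rcases h x (by simp [hx]) with h0 | h0 <;> omega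
        exact List.sum_nonneg this
      rw [List.sum_cons]
      constructor
      · intro h0
        have hsum : t.sum = 0 ∧ a = 0 := by rcases ha with h1 | h1 <;> constructor <;> omega
        intro x hx
        rcases List.mem_cons.mp hx with rfl | hx
        · exact hsum.2
        · exact ((ih (fun x hx => h x (by simp [hx]))).mp hsum.1) x hx
      · intro hall
        have ha0 : a = 0 := hall a (by simp)
        have ht0 : t.sum = 0 := (ih (fun x hx => h x (by simp [hx]))).mpr (fun x hx => hall x (by simp [hx]))
        omega

-- the decrement loop never changes the key list
theorem keys_checkLoop (l : List String) (d : PySem.Dict String Int) :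
    (l.foldl (fun c s => if c.contains s && decide (0 < c.getD s 0) then c.insert s (c.getD s 0 - 1) else c) d).keys = d.keys := by
  induction l generalizing d with
  | nil => simp
  | cons a t ih =>
      simp only [List.foldl_cons]
      by_cases hc : (d.contains a && decide (0 < d.getD a 0)) = true
      · rw [if_pos hc, ih, PySem.Dict.keys_insert_of_contains]
        exact Bool.and_elim_left hc
      · rw [if_neg hc, ih]

-- keys of the initial dict = set(spell)
theorem keys_init (spell : List String) :
    (spell.foldl (fun d s => d.insert s (1 : Int)) PySem.Dict.empty).keys = PySem.Set.ofList spell := by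
  rw [PySem.Dict.keys_foldl_insert]
  simp [PySem.Dict.keys_empty]
  rfl

theorem nodup_keys_init (spell : List String) :
    (spell.foldl (fun d s => d.insert s (1 : Int)) PySem.Dict.empty).keys.Nodup := by
  rw [keys_init]; exact PySem.Set.nodup_ofList spell

-- A's per-word test (the counter dict sums to 0) decides exactly 'covers'
theorem check_iff (spell : List String) (word : String) :
    ((checkWord (spell.foldl (fun d s => d.insert s (1 : Int)) PySem.Dict.empty) word).values.sum = 0)
      ↔ covers spell word = true := by
  set d0 := spell.foldl (fun d s => d.insert s (1 : Int)) PySem.Dict.empty with hd0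
  have hv0 : ∀ j, d0.getD j 0 = 0 ∨ d0.getD j 0 = 1 := by
    intro j; rw [hd0, getD_init]
    by_cases h : j ∈ spell <;> simp [h, PySem.Dict.getD_empty]
  have hget : ∀ k, (checkWord d0 word).getD k 0
      = if d0.getD k 0 = 1 ∧ k ∈ pyChars word then 0 else d0.getD k 0 := by
    intro k; exact getD_checkLoop (pyChars word) d0 hv0 k
  have hkeys : (checkWord d0 word).keys = d0.keys := keys_checkLoop (pyChars word) d0
  have hnd : (checkWord d0 word).keys.Nodup := by rw [hkeys, hd0]; exact nodup_keys_init spell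
  have hvals : (checkWord d0 word).values = (checkWord d0 word).keys.map (fun k => (checkWord d0 word).getD k 0) :=
    PySem.Dict.values_eq_map_keys _ hnd 0
  have hvmem : ∀ x ∈ (checkWord d0 word).values, x = 0 ∨ x = 1 := by
    intro x hx
    rw [hvals] at hx
    rcases List.mem_map.mp hx with ⟨k, _, rfl⟩
    rw [hget k]
    by_cases h : d0.getD k 0 = 1 ∧ k ∈ pyChars word
    · simp [h]
    · rw [if_neg h]; exact hv0 k
  rw [sum_zero_iff _ hvmem]
  have hkd : ∀ k, k ∈ d0.keys ↔ k ∈ spell := by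
    intro k; rw [hd0, keys_init]; exact PySem.Set.mem_ofList _ _
  simp only [covers, List.all_eq_true, decide_eq_true_eq]
  constructor
  · intro h k hk
    have hkm : k ∈ (checkWord d0 word).keys := by rw [hkeys]; exact (hkd k).mpr hk
    have h0 : (checkWord d0 word).getD k 0 = 0 := by
      apply h; rw [hvals]; exact List.mem_map.mpr ⟨k, hkm, rfl⟩
    rw [hget k] at h0
    have h1 : d0.getD k 0 = 1 := by rw [hd0, getD_init]; simp [hk]
    by_cases hmem : k ∈ pyChars word
    · exact hmem
    · rw [if_neg (by exact fun hh => hmem hh.2)] at h0; omega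
  · intro h x hx
    rw [hvals] at hx
    rcases List.mem_map.mp hx with ⟨k, hkm, rfl⟩
    rw [hkeys] at hkm
    have hk' : k ∈ spell := (hkd k).mp hkm
    have h1 : d0.getD k 0 = 1 := by rw [hd0, getD_init]; simp [hk']
    rw [hget k, if_pos ⟨h1, h k hk'⟩]

-- B's staged filtering = one filter by 'covers'
theorem filt_eq (spell : List String) (dic : List String) :
    spell.foldl (fun cs c => cs.filter (fun w => decide (c ∈ pyChars w))) dic
      = dic.filter (covers spell) := by
  induction spell generalizing dic with
  | nil =>
      simp only [List.foldl_nil]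
      rw [List.filter_eq_self.mpr]
      intro w _; simp [covers]
  | cons c t ih =>
      rw [List.foldl_cons, ih, List.filter_filter]
      apply List.filter_congr
      intro w _
      simp [covers, Bool.and_comm]

-- A's word loop returns 1 iff some word survives B's filters
theorem loop_eq_filter (spell : List String) (dic : List String) :
    solutionLoop (spell.foldl (fun d s => d.insert s (1 : Int)) PySem.Dict.empty) dic
      = if dic.filter (covers spell) = [] then 2 else 1 := by
  induction dic with
  | nil => rfl
  | cons w rest ih =>
      simp only [solutionLoop]
      by_cases h : (checkWord (spell.foldl (fun d s => d.insert s (1 : Int)) PySem.Dict.empty) w).values.sum = 0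
      · have hc : covers spell w = true := (check_iff spell w).mp h
        rw [if_pos h, List.filter_cons_of_pos hc]
        simp
      · have hc : covers spell w = false := by
          rcases Bool.eq_false_or_eq_true (covers spell w) with h' | h'
          · exact absurd ((check_iff spell w).mpr h') h
          · exact h'
        rw [if_neg h, List.filter_cons_of_neg (by simp [hc]), ih]

-- ===== VERDICT (by name: the statement is the Claim_ definition above) =====
theorem solution_spec : Claim_equal_solution := by
  intro spell dic _
  show solution spell dic = solution_alt spell dic
  unfold solution solution_alt
  rw [loop_eq_filter, filt_eq]
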